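-- pv_equiv track=rewrite | github.com/cry999/AtCoder | beginner-contest/098/D.py | xor_sum_2
-- ===== SOURCE A (Python) =====
-- def sigmaN(n: int) -> int:
--     """sigma{i=1}{n} i = n * (n+1) / 2
--     """
--     return n * (n+1) // 2
--
-- def xor_sum_2(N: int, A: list) -> int:
--     """Al + ... + Ar = Al ^ ... ^ Ar
--     が成り立つとき、l <= i <= j <= r を満たす全ての
--     (i, j) の組について
--     Ai + ... + Aj = Ai ^ ... ^ Aj
--     が成り立つ。
--     また、
--     Al + ... + Ar != Al ^ ... ^ Ar
--     のとき、
--     A{l-1} + Al + ... + Ar != A{l-1} ^ Al ^ ... ^ Ar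
--     Al + ... + Ar + A{r+1} != Al ^ ... ^ Ar ^ A{r+1}
--     が成り立つ。
--     したがって、まず l を固定して等式が成り立たなくなるまで r
--     を増やしていき、成り立たなくなったら l を一つ進める、という
--     ことを繰り返す尺取り法で O(N) になる。
--     """
--     r = 0              # 右側の上限
--     Sadd, Sxor = 0, 0  # +/^ の累積
--     count = 0          # (l, r) の組み合わせ数
--     overlapped = 0     # 以前に計算済みの部分列との積集合の大きさ
--     for l in range(N):
--         al = A[l]
--         if Sadd != Sxor:
--             # l を進めるときは A[l] の削除と重複部分の削除を行う
--             Sadd, Sxor = Sadd - al, Sxor ^ al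
--             overlapped -= 1
--             continue
--
--         # 重複して数えてしまう部分の削除
--         count -= sigmaN(overlapped-1)
--
--         # r を限界まで伸ばす。
--         while r < N and Sadd == Sxor:
--             ar = A[r]
--             Sadd, Sxor = Sadd + ar, Sxor ^ ar
--             overlapped += 1
--             r += 1
--
--         if Sadd == Sxor:
--             # r を限界まで伸ばして Sadd == Sxor が保たれるということは
--             # r == N であり、ここから l を進めても全部重複部分なので
--             # 計算する必要がなく、終了
--             count += sigmaN(r - l)
--             break
--         else:
--             # r を伸ばすとき、r は Sadd != Sxor になるまで伸ばされていて
--             # 結果的に一つ余計なものを含んでいるので、それを削除する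
--             overlapped -= 1
--             count += sigmaN((r-1) - l)
--
--         # l を進めるにあたり、最左の A[l] は削除する必要がある
--         Sadd, Sxor = Sadd - al, Sxor ^ al
--
--     return count
-- ===== SOURCE B (Python) =====
-- def xor_sum_2(N: int, A: list) -> int:
--     """Right-endpoint two-pointer: for each r keep the smallest l with
--     sum(A[l:r+1]) == xor(A[l:r+1]) and add the window length."""
--     cur_sum = 0
--     cur_xor = 0
--     l = 0
--     ans = 0
--     for r in range(N):
--         cur_sum += A[r]
--         cur_xor ^= A[r]
--         while cur_sum != cur_xor:
--             cur_sum -= A[l]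
--             cur_xor ^= A[l]
--             l += 1
--         ans += r - l + 1
--     return ans
-- ===== Notes on version B (the rewrite author's own statement) =====
-- stated objective: simpler
-- what changed: Replaces A's fix-l / extend-r sliding window with triangular-number overlap accounting (count -= sigmaN(overlapped-1), break-vs-else cases) by the canonical fix-r / shrink-l two-pointer that simply adds the window length r-l+1 at every step.
import Mathlib
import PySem

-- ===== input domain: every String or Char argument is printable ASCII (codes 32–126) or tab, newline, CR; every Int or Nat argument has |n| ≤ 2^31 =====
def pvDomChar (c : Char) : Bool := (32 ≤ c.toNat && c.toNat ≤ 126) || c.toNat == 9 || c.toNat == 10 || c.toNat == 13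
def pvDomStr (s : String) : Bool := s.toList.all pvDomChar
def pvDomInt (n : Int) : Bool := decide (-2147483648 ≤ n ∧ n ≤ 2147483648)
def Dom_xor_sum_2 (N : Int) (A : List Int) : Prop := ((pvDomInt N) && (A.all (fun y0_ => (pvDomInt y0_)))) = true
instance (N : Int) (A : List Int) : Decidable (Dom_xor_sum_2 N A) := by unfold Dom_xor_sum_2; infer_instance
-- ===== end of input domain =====

-- B replaces A's fix-l/extend-r window with triangular-number overlap accounting by the
-- canonical fix-r/shrink-l two-pointer adding the window length each step (objective: simpler).

-- ===== PORT A =====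
def sigmaN (n : Int) : Int := PySem.Int.floordiv (n * (n + 1)) 2

-- the inner `while r < N and Sadd == Sxor` loop of A; fuel (N - r).toNat is exact
def xorA_ext (A : List Int) (N : Int) (fuel : Nat) (r Sadd Sxor overlapped : Int) :
    Int × Int × Int × Int :=
  match fuel with
  | 0 => (r, Sadd, Sxor, overlapped)
  | fuel + 1 =>
    if r < N ∧ Sadd = Sxor then
      let ar := PySem.List.pyGetD A r 0
      xorA_ext A N fuel (r + 1) (Sadd + ar) (PySem.Int.bxor Sxor ar) (overlapped + 1)
    else (r, Sadd, Sxor, overlapped)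

-- the `for l in range(N)` loop of A; one fuel unit per iteration, `break` = immediate return
def xorA_go (A : List Int) (N : Int) (fuel : Nat) (l r Sadd Sxor count overlapped : Int) : Int :=
  match fuel with
  | 0 => count
  | fuel + 1 =>
    let al := PySem.List.pyGetD A l 0
    if Sadd ≠ Sxor then
      xorA_go A N fuel (l + 1) r (Sadd - al) (PySem.Int.bxor Sxor al) count (overlapped - 1)
    else
      let count1 := count - sigmaN (overlapped - 1)
      match xorA_ext A N (N - r).toNat r Sadd Sxor overlapped with
      | (r', Sadd', Sxor', ov') =>
        if Sadd' = Sxor' then count1 + sigmaN (r' - l)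
        else
          xorA_go A N fuel (l + 1) r' (Sadd' - al) (PySem.Int.bxor Sxor' al)
            (count1 + sigmaN (r' - 1 - l)) (ov' - 1)

def xor_sum_2 (N : Int) (A : List Int) : Int := xorA_go A N N.toNat 0 0 0 0 0 0

-- ===== PORT B =====
-- the `while cur_sum != cur_xor` shrink loop of B; fuel (r + 1 - l).toNat is sufficient
def xorB_shrink (A : List Int) (fuel : Nat) (l s x : Int) : Int × Int × Int :=
  match fuel with
  | 0 => (l, s, x)
  | fuel + 1 =>
    if s ≠ x then
      let al := PySem.List.pyGetD A l 0
      xorB_shrink A fuel (l + 1) (s - al) (PySem.Int.bxor x al)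
    else (l, s, x)

-- the `for r in range(N)` loop of B
def xorB_go (A : List Int) (fuel : Nat) (r l s x ans : Int) : Int :=
  match fuel with
  | 0 => ans
  | fuel + 1 =>
    let ar := PySem.List.pyGetD A r 0
    let s1 := s + ar
    let x1 := PySem.Int.bxor x ar
    match xorB_shrink A (r + 1 - l).toNat l s1 x1 with
    | (l', s', x') => xorB_go A fuel (r + 1) l' s' x' (ans + (r - l' + 1))

def xor_sum_2_alt (N : Int) (A : List Int) : Int := xorB_go A N.toNat 0 0 0 0 0

-- ===== PRECONDITION & SPEC =====
-- Pre_ excludes exactly N > len(A), where Python A (and Python B) raise IndexError at A[l].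
def Pre_xor_sum_2 (N : Int) (A : List Int) : Prop := N ≤ (A.length : Int)
instance (N : Int) (A : List Int) : Decidable (Pre_xor_sum_2 N A) := by
  unfold Pre_xor_sum_2; infer_instance
def pvWitness_xor_sum_2 : Int × List Int := (3, [1, 2, 1])

def Spec_xor_sum_2 (N : Int) (A : List Int) (out : Int) : Prop := out = xor_sum_2_alt N A
instance (N : Int) (A : List Int) (out : Int) : Decidable (Spec_xor_sum_2 N A out) := by
  unfold Spec_xor_sum_2; infer_instance

-- ===== CLAIM (what is proved, stated in full; the proofs are below) =====
def Claim_equal_xor_sum_2 : Prop :=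
  ∀ (N : Int) (A : List Int), Dom_xor_sum_2 N A → Pre_xor_sum_2 N A →
    Spec_xor_sum_2 N A (xor_sum_2 N A)

-- ===== LEMMAS AND PROOFS =====

-- prefix sum and prefix xor of the first r elements
def pvSum (A : List Int) : Nat → Int
  | 0 => 0
  | r + 1 => pvSum A r + A.getD r 0

def pvXor (A : List Int) : Nat → Int
  | 0 => 0
  | r + 1 => PySem.Int.bxor (pvXor A r) (A.getD r 0)

-- "window [l, r) has sum = xor": both running quantities in prefix form
def pvP (A : List Int) (l r : Nat) : Prop :=
  pvSum A r - pvSum A l = PySem.Int.bxor (pvXor A r) (pvXor A l)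

theorem pvBxor_assoc (a b c : Int) :
    PySem.Int.bxor (PySem.Int.bxor a b) c = PySem.Int.bxor a (PySem.Int.bxor b c) := by
  have hnn : ∀ w : Nat, ¬ ((0:Int) ≤ -(w:Int) - 1) := by intro w; omega
  have hct : ∀ w : Nat, (-(-(w:Int) - 1) - 1) = (w:Int) := by intro w; ring
  unfold PySem.Int.bxor
  by_cases ha : 0 ≤ a <;> by_cases hb : 0 ≤ b <;> by_cases hc : 0 ≤ c <;>
    simp only [ha, hb, hc, if_false, Int.natCast_nonneg, hnn, hct,
      Int.toNat_natCast, if_pos, Nat.xor_assoc]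

theorem pvBxor_right_comm (a b c : Int) :
    PySem.Int.bxor (PySem.Int.bxor a b) c = PySem.Int.bxor (PySem.Int.bxor a c) b := by
  rw [pvBxor_assoc, PySem.Int.bxor_comm b c, pvBxor_assoc]

theorem pvP_refl (A : List Int) (r : Nat) : pvP A r r := by
  unfold pvP; simp

theorem pvXor_succ (A : List Int) (r : Nat) :
    pvXor A (r + 1) = PySem.Int.bxor (pvXor A r) (A.getD r 0) := rfl

-- xor of window after extending on the right
theorem pvX_rstep (A : List Int) (l r : Nat) :
    PySem.Int.bxor (PySem.Int.bxor (pvXor A r) (pvXor A l)) (A.getD r 0)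
      = PySem.Int.bxor (pvXor A (r + 1)) (pvXor A l) := by
  rw [pvBxor_right_comm, pvXor_succ]

-- xor of window after removing the left end
theorem pvX_lstep (A : List Int) (l r : Nat) :
    PySem.Int.bxor (PySem.Int.bxor (pvXor A r) (pvXor A l)) (A.getD l 0)
      = PySem.Int.bxor (pvXor A r) (pvXor A (l + 1)) := by
  rw [pvBxor_assoc, pvXor_succ]

theorem sigmaN_succ (m : Int) : sigmaN (m + 1) = sigmaN m + (m + 1) := by
  have e1 : Even (m * (m + 1)) := Int.even_mul_succ_self m
  obtain ⟨k, hk⟩ := e1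
  have e2 : Even ((m + 1) * (m + 1 + 1)) := Int.even_mul_succ_self (m + 1)
  obtain ⟨j, hj⟩ := e2
  have h1 : sigmaN m = k := by
    unfold sigmaN
    rw [hk, PySem.Int.floordiv_eq_ediv_of_pos (by omega)]
    omega
  have h2 : sigmaN (m + 1) = j := by
    unfold sigmaN
    rw [hj, PySem.Int.floordiv_eq_ediv_of_pos (by omega)]
    omega
  have hrel : j = k + (m + 1) := by nlinarith [hk, hj]
  omega

-- A's maximal extension endpoint, and B's shrink endpoint, as Nat functions
def pvExt (A : List Int) (n l r : Nat) : Nat :=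
  if h : r < n ∧ pvSum A r - pvSum A l = PySem.Int.bxor (pvXor A r) (pvXor A l) then
    pvExt A n l (r + 1)
  else r
termination_by n - r
decreasing_by omega

def pvShr (A : List Int) (m l : Nat) : Nat :=
  if h : l < m ∧ ¬ (pvSum A m - pvSum A l = PySem.Int.bxor (pvXor A m) (pvXor A l)) then
    pvShr A m (l + 1)
  else l
termination_by m - l
decreasing_by omega

theorem pvExt_ge (A : List Int) (n l r : Nat) : r ≤ pvExt A n l r := by
  fun_induction pvExt A n l r with
  | case1 r h ih => omega
  | case2 r h => omega

theorem pvExt_le (A : List Int) (n l r : Nat) (h : r ≤ n) : pvExt A n l r ≤ n := by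
  fun_induction pvExt A n l r with
  | case1 r h ih => exact ih (by omega)
  | case2 r h2 => exact h

theorem pvExt_P (A : List Int) (n l r : Nat) :
    ∀ m, r ≤ m → m < pvExt A n l r → pvP A l m := by
  fun_induction pvExt A n l r with
  | case1 r h ih =>
    intro m hm1 hm2
    rcases Nat.eq_or_lt_of_le hm1 with he | hl
    · subst he; exact h.2
    · exact ih m hl hm2
  | case2 r h =>
    intro m hm1 hm2
    omega

theorem pvExt_stop (A : List Int) (n l r : Nat) (h : r ≤ n) :
    pvExt A n l r = n ∨ ¬ pvP A l (pvExt A n l r) := by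
  fun_induction pvExt A n l r with
  | case1 r h ih => exact ih (by omega)
  | case2 r h2 =>
    by_cases hp : pvP A l r
    · left
      have : ¬ r < n := fun hc => h2 ⟨hc, hp⟩
      omega
    · right; exact hp

theorem pvExt_unfold (A : List Int) (n l r : Nat) (h1 : r < n) (h2 : pvP A l r) :
    pvExt A n l r = pvExt A n l (r + 1) := by
  rw [pvExt]; rw [dif_pos ⟨h1, h2⟩]

theorem pvExt_eq_self (A : List Int) (n l r : Nat) (h : ¬ (r < n ∧ pvP A l r)) :
    pvExt A n l r = r := by
  rw [pvExt]; rw [dif_neg]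
  intro hc; exact h ⟨hc.1, hc.2⟩

theorem pvShr_ge (A : List Int) (m l : Nat) : l ≤ pvShr A m l := by
  fun_induction pvShr A m l with
  | case1 l h ih => omega
  | case2 l h => omega

theorem pvShr_le (A : List Int) (m l : Nat) (h : l ≤ m) : pvShr A m l ≤ m := by
  fun_induction pvShr A m l with
  | case1 l h ih => exact ih (by omega)
  | case2 l h2 => exact h

theorem pvShr_P (A : List Int) (m l : Nat) (h : l ≤ m) : pvP A (pvShr A m l) m := by
  fun_induction pvShr A m l with
  | case1 l h ih => exact ih (by omega)
  | case2 l h2 =>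
    by_cases hp : pvP A l m
    · exact hp
    · have : ¬ l < m := fun hc => h2 ⟨hc, hp⟩
      have hlm : l = m := by omega
      subst hlm
      exact pvP_refl A l

theorem pvShr_unfold (A : List Int) (m l : Nat) (h1 : l ≤ m) (h2 : ¬ pvP A l m) :
    pvShr A m l = pvShr A m (l + 1) := by
  have hlt : l < m := by
    rcases Nat.lt_or_ge l m with h | h
    · exact h
    · have hlm : l = m := by omega
      subst hlm
      exact absurd (pvP_refl A l) h2
  rw [pvShr]; rw [dif_pos ⟨hlt, h2⟩]

theorem pvShr_eq_self (A : List Int) (m l : Nat) (h : pvP A l m) : pvShr A m l = l := by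
  rw [pvShr]; rw [dif_neg]; intro hc; exact hc.2 h

-- the port of A's inner while loop computes pvExt (fuel ≥ n - r)
theorem xorA_ext_eq (A : List Int) (n l : Nat) :
    ∀ (k r : Nat) (ov : Int), n ≤ r + k →
    xorA_ext A (n : Int) k (r : Int) (pvSum A r - pvSum A l)
        (PySem.Int.bxor (pvXor A r) (pvXor A l)) ov
      = ((pvExt A n l r : Int), pvSum A (pvExt A n l r) - pvSum A l,
         PySem.Int.bxor (pvXor A (pvExt A n l r)) (pvXor A l),
         ov + ((pvExt A n l r : Int) - (r : Int))) := by
  intro k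
  induction k with
  | zero =>
    intro r ov hk
    have he : pvExt A n l r = r := pvExt_eq_self A n l r (by omega)
    rw [xorA_ext, he]
    simp
  | succ k ih =>
    intro r ov hk
    rw [xorA_ext]
    by_cases h : r < n ∧ pvP A l r
    · rw [if_pos (by exact ⟨by exact_mod_cast h.1, h.2⟩)]
      have hg : PySem.List.pyGetD A (r : Int) 0 = A.getD r 0 := by
        simp [PySem.List.pyGetD_natCast]
      have hs : pvSum A r - pvSum A l + PySem.List.pyGetD A (r : Int) 0
          = pvSum A (r + 1) - pvSum A l := by
        rw [hg]; show _ = pvSum A r + A.getD r 0 - pvSum A l; ring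
      have hx : PySem.Int.bxor (PySem.Int.bxor (pvXor A r) (pvXor A l))
            (PySem.List.pyGetD A (r : Int) 0)
          = PySem.Int.bxor (pvXor A (r + 1)) (pvXor A l) := by
        rw [hg]; exact pvX_rstep A l r
      simp only [hs, hx]
      have hcast : ((r : Int) + 1) = ((r + 1 : Nat) : Int) := by push_cast; ring
      rw [hcast]
      rw [ih (r + 1) (ov + 1) (by omega)]
      rw [pvExt_unfold A n l r h.1 h.2]
      simp only [Prod.mk.injEq, true_and]
      push_cast
      ring
    · rw [if_neg (by intro hc; exact h ⟨by exact_mod_cast hc.1, hc.2⟩)]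
      rw [pvExt_eq_self A n l r h]
      simp


-- the port of B's shrink loop computes pvShr (fuel ≥ m - l)
theorem xorB_shrink_eq (A : List Int) (m : Nat) :
    ∀ (k l : Nat), m ≤ l + k → l ≤ m →
    xorB_shrink A k (l : Int) (pvSum A m - pvSum A l)
        (PySem.Int.bxor (pvXor A m) (pvXor A l))
      = ((pvShr A m l : Int), pvSum A m - pvSum A (pvShr A m l),
         PySem.Int.bxor (pvXor A m) (pvXor A (pvShr A m l))) := by
  intro k
  induction k with
  | zero =>
    intro l h1 h2
    have hlm : l = m := by omega
    subst hlm
    rw [pvShr_eq_self A l l (pvP_refl A l), xorB_shrink]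
  | succ k ih =>
    intro l h1 h2
    rw [xorB_shrink]
    by_cases hp : pvP A l m
    · rw [if_neg (by simpa using hp)]
      rw [pvShr_eq_self A m l hp]
    · rw [if_pos (by simpa using hp)]
      have hlt : l < m := by
        rcases Nat.lt_or_ge l m with h | h
        · exact h
        · have : l = m := by omega
          subst this
          exact absurd (pvP_refl A l) hp
      have hg : PySem.List.pyGetD A (l : Int) 0 = A.getD l 0 := by
        simp [PySem.List.pyGetD_natCast]
      have hs : pvSum A m - pvSum A l - PySem.List.pyGetD A (l : Int) 0
          = pvSum A m - pvSum A (l + 1) := by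
        rw [hg]; show _ = pvSum A m - (pvSum A l + A.getD l 0); ring
      have hx : PySem.Int.bxor (PySem.Int.bxor (pvXor A m) (pvXor A l))
            (PySem.List.pyGetD A (l : Int) 0)
          = PySem.Int.bxor (pvXor A m) (pvXor A (l + 1)) := by
        rw [hg]; exact pvX_lstep A l m
      simp only [hs, hx]
      have hcast : ((l : Int) + 1) = ((l + 1 : Nat) : Int) := by push_cast; ring
      rw [hcast, ih (l + 1) (by omega) (by omega)]
      rw [pvShr_unfold A m l h2 hp]


-- A over a run of `continue` iterations (Sadd ≠ Sxor) advances l to pvShr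
theorem xorA_go_run (A : List Int) (n r : Nat) (hr : r ≤ n) :
    ∀ (j l : Nat) (c : Int), pvShr A r l ≤ l + j → l ≤ r →
    xorA_go A (n : Int) (n - l) (l : Int) (r : Int) (pvSum A r - pvSum A l)
        (PySem.Int.bxor (pvXor A r) (pvXor A l)) c ((r : Int) - (l : Int))
      = xorA_go A (n : Int) (n - pvShr A r l) ((pvShr A r l : Int)) (r : Int)
          (pvSum A r - pvSum A (pvShr A r l))
          (PySem.Int.bxor (pvXor A r) (pvXor A (pvShr A r l))) c
          ((r : Int) - (pvShr A r l : Int)) := by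
  intro j
  induction j with
  | zero =>
    intro l c h1 h2
    have : pvShr A r l = l := by have := pvShr_ge A r l; omega
    rw [this]
  | succ j ih =>
    intro l c h1 h2
    by_cases hp : pvP A l r
    · rw [pvShr_eq_self A r l hp]
    · have hlr : l < r := by
        rcases Nat.lt_or_ge l r with h | h
        · exact h
        · have : l = r := by omega
          subst this
          exact absurd (pvP_refl A l) hp
      obtain ⟨f, hf⟩ : ∃ f, n - l = f + 1 := ⟨n - (l + 1), by omega⟩
      rw [hf, xorA_go]
      rw [if_pos (by simpa using hp)]
      have hg : PySem.List.pyGetD A (l : Int) 0 = A.getD l 0 := by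
        simp [PySem.List.pyGetD_natCast]
      have hs : pvSum A r - pvSum A l - PySem.List.pyGetD A (l : Int) 0
          = pvSum A r - pvSum A (l + 1) := by
        rw [hg]; show _ = pvSum A r - (pvSum A l + A.getD l 0); ring
      have hx : PySem.Int.bxor (PySem.Int.bxor (pvXor A r) (pvXor A l))
            (PySem.List.pyGetD A (l : Int) 0)
          = PySem.Int.bxor (pvXor A r) (pvXor A (l + 1)) := by
        rw [hg]; exact pvX_lstep A l r
      rw [hs, hx]
      have hov : (r : Int) - (l : Int) - 1 = (r : Int) - ((l + 1 : Nat) : Int) := by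
        push_cast; ring
      have hc1 : ((l : Int) + 1) = ((l + 1 : Nat) : Int) := by push_cast; ring
      have hfu : f = n - (l + 1) := by omega
      rw [hov, hc1, hfu]
      rw [ih (l + 1) c (by rw [← pvShr_unfold A r l h2 hp]; omega) (by omega)]
      rw [← pvShr_unfold A r l h2 hp]


theorem xorB_go_acc (A : List Int) :
    ∀ (k : Nat) (r l s x a : Int),
    xorB_go A k r l s x a = a + xorB_go A k r l s x 0 := by
  intro k
  induction k with
  | zero => intro r l s x a; simp [xorB_go]
  | succ k ih =>
    intro r l s x a
    rw [xorB_go, xorB_go]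
    rcases h : xorB_shrink A (r + 1 - l).toNat l (s + PySem.List.pyGetD A r 0)
        (PySem.Int.bxor x (PySem.List.pyGetD A r 0)) with ⟨l', s', x'⟩
    dsimp only
    rw [ih (r+1) l' s' x' (a + (r - l' + 1)), ih (r+1) l' s' x' (0 + (r - l' + 1))]
    ring

-- B over a run of endpoints m with pvP A l m: l stays put, ans grows by a triangular difference
theorem xorB_go_flat (A : List Int) (n l : Nat) :
    ∀ (d r : Nat), r + d ≤ n → l ≤ r → (∀ m, r ≤ m → m ≤ r + d → pvP A l m) →
    xorB_go A (n - r) (r : Int) (l : Int) (pvSum A r - pvSum A l)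
        (PySem.Int.bxor (pvXor A r) (pvXor A l)) 0
      = (sigmaN ((r : Int) + (d : Int) - (l : Int)) - sigmaN ((r : Int) - (l : Int)))
        + xorB_go A (n - (r + d)) ((r + d : Nat) : Int) (l : Int)
            (pvSum A (r + d) - pvSum A l)
            (PySem.Int.bxor (pvXor A (r + d)) (pvXor A l)) 0 := by
  intro d
  induction d with
  | zero =>
    intro r h1 h2 h3
    simp
  | succ d ih =>
    intro r h1 h2 h3
    have hrn : r < n := by omega
    obtain ⟨f, hf⟩ : ∃ f, n - r = f + 1 := ⟨n - (r + 1), by omega⟩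
    rw [hf, xorB_go]
    have hg : PySem.List.pyGetD A (r : Int) 0 = A.getD r 0 := by
      simp [PySem.List.pyGetD_natCast]
    have hs : pvSum A r - pvSum A l + PySem.List.pyGetD A (r : Int) 0
        = pvSum A (r + 1) - pvSum A l := by
      rw [hg]; show _ = pvSum A r + A.getD r 0 - pvSum A l; ring
    have hx : PySem.Int.bxor (PySem.Int.bxor (pvXor A r) (pvXor A l))
          (PySem.List.pyGetD A (r : Int) 0)
        = PySem.Int.bxor (pvXor A (r + 1)) (pvXor A l) := by
      rw [hg]; exact pvX_rstep A l r
    dsimp only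
    rw [hs, hx]
    have hk : ((r : Int) + 1 - (l : Int)).toNat = r + 1 - l := by omega
    rw [hk]
    rw [xorB_shrink_eq A (r + 1) (r + 1 - l) l (by omega) (by omega)]
    have hp1 : pvP A l (r + 1) := h3 (r + 1) (by omega) (by omega)
    rw [pvShr_eq_self A (r + 1) l hp1]
    dsimp only
    have hc1 : ((r : Int) + 1) = ((r + 1 : Nat) : Int) := by push_cast; ring
    have hfu : f = n - (r + 1) := by omega
    rw [hc1, hfu]
    rw [xorB_go_acc A (n - (r + 1)) ((r + 1 : Nat) : Int) (l : Int) _ _ (0 + ((r : Int) - (l : Int) + 1))]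
    rw [ih (r + 1) (by omega) (by omega) (fun m hm1 hm2 => h3 m (by omega) (by omega))]
    have hT : sigmaN ((r : Int) + 1 - (l : Int)) = sigmaN ((r : Int) - (l : Int)) + ((r : Int) - (l : Int) + 1) := by
      have := sigmaN_succ ((r : Int) - (l : Int))
      rw [show (r : Int) - (l : Int) + 1 = (r : Int) + 1 - (l : Int) by ring] at this
      linarith
    have hcast2 : (((r + 1 : Nat) : Int) + (d : Int) - (l : Int)) = ((r : Int) + ((d + 1 : Nat) : Int) - (l : Int)) := by
      push_cast; ring
    have hcast3 : (((r + 1 : Nat) : Int) - (l : Int)) = ((r : Int) + 1 - (l : Int)) := by push_cast; ring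
    have hre : r + 1 + d = r + (d + 1) := by omega
    rw [hcast2, hcast3, hre] at *
    linarith [hT]


-- A from an equal window [l, n): the break lump
theorem pvMain_last (A : List Int) (n l : Nat) (c : Int) (hl : l ≤ n) (hP : pvP A l n) :
    xorA_go A (n : Int) (n - l) (l : Int) (n : Int) (pvSum A n - pvSum A l)
        (PySem.Int.bxor (pvXor A n) (pvXor A l)) c ((n : Int) - (l : Int))
      = c + ((n : Int) - (l : Int)) := by
  rcases Nat.eq_or_lt_of_le hl with he | hlt
  · subst he
    simp [xorA_go]
  · obtain ⟨f, hf⟩ : ∃ f, n - l = f + 1 := ⟨n - (l + 1), by omega⟩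
    rw [hf, xorA_go]
    rw [if_neg (fun hc => hc hP)]
    have hk0 : ((n : Int) - (n : Int)).toNat = 0 := by omega
    rw [hk0]
    rw [xorA_ext_eq A n l 0 n ((n : Int) - (l : Int)) (by omega)]
    rw [pvExt_eq_self A n l n (by omega)]
    dsimp only
    rw [if_pos (show pvSum A n - pvSum A l
      = PySem.Int.bxor (pvXor A n) (pvXor A l) from hP)]
    have hT := sigmaN_succ ((n : Int) - (l : Int) - 1)
    have harg : (n : Int) - (l : Int) - 1 + 1 = (n : Int) - (l : Int) := by ring
    rw [harg] at hT
    linarith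

theorem pvMain (A : List Int) (n : Nat) :
    ∀ (k r l : Nat) (c : Int), n ≤ r + k → l ≤ r → r ≤ n → pvP A l r →
    xorA_go A (n : Int) (n - l) (l : Int) (r : Int) (pvSum A r - pvSum A l)
        (PySem.Int.bxor (pvXor A r) (pvXor A l)) c ((r : Int) - (l : Int))
      = c + ((r : Int) - (l : Int))
        + xorB_go A (n - r) (r : Int) (l : Int) (pvSum A r - pvSum A l)
            (PySem.Int.bxor (pvXor A r) (pvXor A l)) 0 := by
  intro k
  induction k with
  | zero =>
    intro r l c hk hlr hrn hP
    have he : r = n := by omega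
    subst he
    rw [Nat.sub_self]
    rw [show xorB_go A 0 (r : Int) (l : Int) (pvSum A r - pvSum A l)
        (PySem.Int.bxor (pvXor A r) (pvXor A l)) 0 = 0 from rfl]
    rw [pvMain_last A r l c hlr hP]
    ring
  | succ k ih =>
    intro r l c hk hlr hrn hP
    rcases Nat.eq_or_lt_of_le hrn with he | hrlt
    · subst he
      rw [Nat.sub_self]
      rw [show xorB_go A 0 (r : Int) (l : Int) (pvSum A r - pvSum A l)
          (PySem.Int.bxor (pvXor A r) (pvXor A l)) 0 = 0 from rfl]
      rw [pvMain_last A r l c hlr hP]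
      ring
    · -- r < n : A takes the equal branch and extends to r' = pvExt
      have hln : l < n := by omega
      obtain ⟨f, hf⟩ : ∃ f, n - l = f + 1 := ⟨n - (l + 1), by omega⟩
      rw [hf, xorA_go]
      rw [if_neg (fun hc => hc hP)]
      have hkext : ((n : Int) - (r : Int)).toNat = n - r := by omega
      rw [hkext]
      rw [xorA_ext_eq A n l (n - r) r ((r : Int) - (l : Int)) (by omega)]
      dsimp only
      have hr1 : r + 1 ≤ pvExt A n l r := by
        rw [pvExt_unfold A n l r hrlt hP]
        exact pvExt_ge A n l (r + 1)
      have hr'n : pvExt A n l r ≤ n := pvExt_le A n l r (by omega)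
      obtain ⟨r2, hr2⟩ : ∃ r2, pvExt A n l r = r2 + 1 := ⟨pvExt A n l r - 1, by omega⟩
      by_cases hP' : pvP A l (pvExt A n l r)
      · rw [if_pos (show pvSum A (pvExt A n l r) - pvSum A l
          = PySem.Int.bxor (pvXor A (pvExt A n l r)) (pvXor A l) from hP')]
        have hrn' : pvExt A n l r = n := by
          rcases pvExt_stop A n l r (by omega) with h | h
          · exact h
          · exact absurd hP' h
        -- B side: flat run all the way to n
        rw [xorB_go_flat A n l (n - r) r (by omega) hlr
          (fun m hm1 hm2 => by
            rcases Nat.eq_or_lt_of_le (show m ≤ n by omega) with hmn | hmn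
            · subst hmn; rw [← hrn']; exact hP'
            · exact pvExt_P A n l r m hm1 (by omega))]
        rw [Nat.add_sub_cancel' (by omega : r ≤ n), Nat.sub_self]
        rw [show ∀ (s x : Int), xorB_go A 0 ((n : Nat) : Int) (l : Int) s x 0 = 0
          from fun s x => rfl]
        have hcast : ((r : Int) + ((n - r : Nat) : Int) - (l : Int)) = (n : Int) - (l : Int) := by
          push_cast [Nat.cast_sub (by omega : r ≤ n)]; ring
        rw [hcast, hrn']
        have hT := sigmaN_succ ((r : Int) - (l : Int) - 1)
        have harg : (r : Int) - (l : Int) - 1 + 1 = (r : Int) - (l : Int) := by ring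
        rw [harg] at hT
        linarith
      · rw [if_neg (show ¬ (pvSum A (pvExt A n l r) - pvSum A l
          = PySem.Int.bxor (pvXor A (pvExt A n l r)) (pvXor A l)) from hP')]
        -- A continues at l+1 with the窗口 [l+1, r'); run the ¬P stretch, then IH
        have hgl : PySem.List.pyGetD A (l : Int) 0 = A.getD l 0 := by
          simp [PySem.List.pyGetD_natCast]
        have hs : pvSum A (pvExt A n l r) - pvSum A l - PySem.List.pyGetD A (l : Int) 0
            = pvSum A (pvExt A n l r) - pvSum A (l + 1) := by
          rw [hgl]; show _ = pvSum A (pvExt A n l r) - (pvSum A l + A.getD l 0); ring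
        have hx : PySem.Int.bxor
              (PySem.Int.bxor (pvXor A (pvExt A n l r)) (pvXor A l))
              (PySem.List.pyGetD A (l : Int) 0)
            = PySem.Int.bxor (pvXor A (pvExt A n l r)) (pvXor A (l + 1)) := by
          rw [hgl]; exact pvX_lstep A l (pvExt A n l r)
        rw [hs, hx]
        have hov : (r : Int) - (l : Int) + ((pvExt A n l r : Int) - (r : Int)) - 1
            = (pvExt A n l r : Int) - ((l + 1 : Nat) : Int) := by push_cast; ring
        have hc1 : ((l : Int) + 1) = ((l + 1 : Nat) : Int) := by push_cast; ring
        have hfu : f = n - (l + 1) := by omega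
        rw [hov, hc1, hfu]
        have hl1r' : l + 1 ≤ pvExt A n l r := by omega
        rw [xorA_go_run A n (pvExt A n l r) hr'n (pvExt A n l r - (l + 1)) (l + 1) _
          (by have := pvShr_le A (pvExt A n l r) (l + 1) hl1r'; omega) hl1r']
        rw [ih (pvExt A n l r) (pvShr A (pvExt A n l r) (l + 1)) _
          (by omega) (pvShr_le A (pvExt A n l r) (l + 1) hl1r') hr'n
          (pvShr_P A (pvExt A n l r) (l + 1) hl1r')]
        -- B side: flat run to r' - 1, then one shrinking step
        have hshr : pvShr A (pvExt A n l r) l = pvShr A (pvExt A n l r) (l + 1) :=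
          pvShr_unfold A (pvExt A n l r) l (by omega) hP'
        rw [xorB_go_flat A n l (r2 - r) r (by omega) hlr
          (fun m hm1 hm2 => pvExt_P A n l r m hm1 (by omega))]
        have hr2r : r + (r2 - r) = r2 := by omega
        rw [hr2r]
        -- one step of xorB_go at endpoint r2 (window end becomes r2+1 = pvExt)
        obtain ⟨f2, hf2⟩ : ∃ f2, n - r2 = f2 + 1 := ⟨n - (r2 + 1), by omega⟩
        rw [hf2, xorB_go]
        have hgr : PySem.List.pyGetD A (r2 : Int) 0 = A.getD r2 0 := by
          simp [PySem.List.pyGetD_natCast]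
        have hs2 : pvSum A r2 - pvSum A l + PySem.List.pyGetD A (r2 : Int) 0
            = pvSum A (r2 + 1) - pvSum A l := by
          rw [hgr]; show _ = pvSum A r2 + A.getD r2 0 - pvSum A l; ring
        have hx2 : PySem.Int.bxor (PySem.Int.bxor (pvXor A r2) (pvXor A l))
              (PySem.List.pyGetD A (r2 : Int) 0)
            = PySem.Int.bxor (pvXor A (r2 + 1)) (pvXor A l) := by
          rw [hgr]; exact pvX_rstep A l r2
        dsimp only
        rw [hs2, hx2]
        have hk2 : ((r2 : Int) + 1 - (l : Int)).toNat = r2 + 1 - l := by omega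
        rw [hk2]
        rw [xorB_shrink_eq A (r2 + 1) (r2 + 1 - l) l (by omega) (by omega)]
        rw [← hr2, hshr]
        dsimp only
        have hc2 : ((r2 : Int) + 1) = ((r2 + 1 : Nat) : Int) := by push_cast; ring
        have hf2' : f2 = n - (r2 + 1) := by omega
        rw [hc2, hf2', ← hr2]
        rw [xorB_go_acc A (n - pvExt A n l r) ((pvExt A n l r : Nat) : Int) _ _ _
          (0 + ((r2 : Int) - (pvShr A (pvExt A n l r) (l + 1) : Int) + 1))]
        -- pure triangular algebra
        have hT := sigmaN_succ ((r : Int) - (l : Int) - 1)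
        have harg : (r : Int) - (l : Int) - 1 + 1 = (r : Int) - (l : Int) := by ring
        rw [harg] at hT
        have hA1 : ((pvExt A n l r : Int) - 1 - (l : Int)) = ((r2 : Int) - (l : Int)) := by
          rw [hr2]; push_cast; ring
        have hA2 : ((r : Int) + ((r2 - r : Nat) : Int) - (l : Int)) = ((r2 : Int) - (l : Int)) := by
          push_cast [Nat.cast_sub (by omega : r ≤ r2)]; ring
        have hA3 : ((r2 : Int) - (pvShr A (pvExt A n l r) (l + 1) : Int) + 1)
            = ((pvExt A n l r : Int) - (pvShr A (pvExt A n l r) (l + 1) : Int)) := by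
          rw [hr2]; push_cast; ring
        rw [hA1, hA2, hA3]
        linarith


-- ===== VERDICT (by name: the statement is the Claim_ definition above) =====
theorem xor_sum_2_spec : Claim_equal_xor_sum_2 := by
  intro N A _ _
  unfold Spec_xor_sum_2 xor_sum_2 xor_sum_2_alt
  rcases Int.lt_or_le N 0 with hN | hN
  · have h0 : N.toNat = 0 := by omega
    rw [h0]
    rfl
  · have hn : ((N.toNat : Nat) : Int) = N := Int.toNat_of_nonneg hN
    have h := pvMain A N.toNat N.toNat 0 0 0 (by omega) (by omega) (by omega) (pvP_refl A 0)
    simp only [Nat.cast_zero, Nat.sub_zero] at h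
    have h0 : pvSum A 0 = 0 := rfl
    have h1 : pvXor A 0 = 0 := rfl
    rw [h0, h1] at h
    simp only [sub_self] at h
    have hb : PySem.Int.bxor (0 : Int) 0 = 0 := by decide
    rw [hb] at h
    rw [hn] at h
    simpa using h
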